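-- pv_equiv track=rewrite | github.com/arom0808/olympiads | tinkoff/algo_students_2023/DAG/D_Python/main.py | first_dfs
-- ===== SOURCE A (Python) =====
-- from collections import deque
--
-- def in_first_dfs(graph: dict[int, list[int]], counters_on_ids: list[int], counter: int, start_id: int) -> int:
--     stack: deque[tuple[int, int]] = deque([(start_id, 0)])
--     while len(stack) != 0:
--         now_act = stack.pop()
--         counter += 1
--         counters_on_ids[now_act[0]] = counter
--         sons = graph[now_act[0]]
--         if now_act[1] >= len(sons):
--             continue
--         stack.append((now_act[0], now_act[1] + 1))
--         next_son_id = sons[now_act[1]]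
--         if counters_on_ids[next_son_id] == 0:
--             stack.append((next_son_id, 0))
--     return counter
--
-- def first_dfs(n: int, graph: dict[int, list[int]]) -> dict[int, int]:
--     counters_on_ids = [0] * n
--     counter = 0
--     for i in range(n):
--         if counters_on_ids[i] == 0:
--             counter = in_first_dfs(graph, counters_on_ids, counter, i) + 1
--     ids_on_counters: dict[int, int] = {}
--     for i in range(n):
--         ids_on_counters[counters_on_ids[i]] = i
--     return ids_on_counters
-- ===== SOURCE B (Python) =====
-- # Recursive-DFS re-implementation: the explicit (node, son-index) stack of A is
-- # replaced by a recursive process() closure threading the counter; same labels.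
-- # Note: A mutates no caller-visible argument; neither does B.
-- def first_dfs(n: int, graph: dict[int, list[int]]) -> dict[int, int]:
--     counters_on_ids = [0] * n
--     counter = 0
--
--     def process(node: int) -> None:
--         nonlocal counter
--         counter += 1
--         counters_on_ids[node] = counter
--         for son in graph[node]:
--             if counters_on_ids[son] == 0:
--                 process(son)
--             counter += 1
--             counters_on_ids[node] = counter
--
--     for i in range(n):
--         if counters_on_ids[i] == 0:
--             process(i)
--             counter += 1
--     return {counters_on_ids[i]: i for i in range(n)}
-- ===== Notes on version B (the rewrite author's own statement) =====
-- stated objective: alternative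
-- what changed: A simulates the DFS with an explicit deque of (node, son-index) frames re-pushed once per son; B replaces the stack machine by a recursive process(node) closure that increments/relabels on entry and once after each son, a genuinely different decomposition of the same labeling.
-- outside the precondition, e.g. on first_dfs(1, {0: [-1]}): A returns {2: 0}, B returns {2: 0}
import Mathlib
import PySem

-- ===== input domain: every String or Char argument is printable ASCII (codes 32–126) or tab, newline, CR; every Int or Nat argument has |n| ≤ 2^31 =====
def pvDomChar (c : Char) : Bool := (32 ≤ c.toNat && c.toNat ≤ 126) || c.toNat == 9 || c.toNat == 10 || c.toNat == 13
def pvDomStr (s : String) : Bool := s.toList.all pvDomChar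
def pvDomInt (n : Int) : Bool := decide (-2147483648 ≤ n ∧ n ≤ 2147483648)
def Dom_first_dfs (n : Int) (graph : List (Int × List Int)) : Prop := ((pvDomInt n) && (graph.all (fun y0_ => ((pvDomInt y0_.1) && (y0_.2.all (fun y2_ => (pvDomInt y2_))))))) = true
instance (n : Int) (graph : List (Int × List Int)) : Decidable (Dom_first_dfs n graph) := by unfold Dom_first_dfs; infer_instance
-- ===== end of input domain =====

-- B replaces A's explicit (node, son-index) frame stack by a recursive per-node
-- procedure threading the counter; same return value (no caller-visible mutation).

-- `graph[v]` (dict lookup, first match in the association list)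
def pvLook (graph : List (Int × List Int)) (v : Int) : Option (List Int) :=
  PySem.Dict.get? (PySem.Dict.mk graph) v

-- ===== PORT A =====
-- A's while-loop over the explicit stack (fuel makes it total; `none` = fuel
-- exhausted or a Python exception — both impossible under Pre_first_dfs).
def inFirstDfs (graph : List (Int × List Int)) :
    Nat → List (Int × Int) → List Int → Int → Option (List Int × Int)
  | 0, _, _, _ => none
  | _ + 1, [], cv, counter => some (cv, counter)
  | f + 1, (node, k) :: rest, cv, counter =>
    match PySem.List.pySet? cv node (counter + 1) with
    | none => none
    | some cv' =>
      match pvLook graph node with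
      | none => none
      | some sons =>
        if (sons.length : Int) ≤ k then
          inFirstDfs graph f rest cv' (counter + 1)
        else
          match PySem.List.pyGet? sons k with
          | none => none
          | some son =>
            match PySem.List.pyGet? cv' son with
            | none => none
            | some v =>
              if v = 0 then inFirstDfs graph f ((son, 0) :: (node, k + 1) :: rest) cv' (counter + 1)
              else inFirstDfs graph f ((node, k + 1) :: rest) cv' (counter + 1)

def first_dfs (n : Int) (graph : List (Int × List Int)) : List (Int × Int) :=
  let F := n.toNat * ((graph.map (fun p => p.2.length + 1)).sum + 1) + 1
  let st := (PySem.List.pyRange 0 n 1).foldl (fun (st : List Int × Int) i =>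
      if PySem.List.pyGetD st.1 i 0 = 0 then
        match inFirstDfs graph F [(i, 0)] st.1 st.2 with
        | none => st
        | some (cv', ctr') => (cv', ctr' + 1)
      else st)
    (List.replicate n.toNat 0, 0)
  ((PySem.List.pyRange 0 n 1).foldl (fun d i =>
      PySem.Dict.insert d (PySem.List.pyGetD st.1 i 0) i) (PySem.Dict.mk [])).items

-- ===== PORT B =====
-- Source B's `for son in graph[node]:` body (recurse if unvisited, then re-label node)
def altSonsGo (rec : List Int → Int → Int → Option (List Int × Int)) (node : Int) :
    List Int → Int → List Int → Option (List Int × Int)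
  | cv, counter, [] => some (cv, counter)
  | cv, counter, son :: rest =>
    match PySem.List.pyGet? cv son with
    | none => none
    | some v =>
      match (if v = 0 then rec cv counter son else some (cv, counter)) with
      | none => none
      | some (c1, k1) =>
        match PySem.List.pySet? c1 node (k1 + 1) with
        | none => none
        | some c2 => altSonsGo rec node c2 (k1 + 1) rest

-- Source B's recursive `process` (fuel makes the recursion total; never exhausted under Pre_)
def altProcess (graph : List (Int × List Int)) :
    Nat → List Int → Int → Int → Option (List Int × Int)
  | 0, _, _, _ => none
  | f + 1, cv, counter, node =>
    match PySem.List.pySet? cv node (counter + 1) with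
    | none => none
    | some cv' =>
      match pvLook graph node with
      | none => none
      | some sons => altSonsGo (altProcess graph f) node cv' (counter + 1) sons

def first_dfs_alt (n : Int) (graph : List (Int × List Int)) : List (Int × Int) :=
  let st := (PySem.List.pyRange 0 n 1).foldl (fun (st : List Int × Int) i =>
      if PySem.List.pyGetD st.1 i 0 = 0 then
        match altProcess graph (n.toNat + 1) st.1 st.2 i with
        | none => st
        | some (cv', ctr') => (cv', ctr' + 1)
      else st)
    (List.replicate n.toNat 0, 0)
  ((PySem.List.pyRange 0 n 1).foldl (fun d i =>
      PySem.Dict.insert d (PySem.List.pyGetD st.1 i 0) i) (PySem.Dict.mk [])).items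

-- ===== PRECONDITION & SPEC =====
-- Pre_ excludes inputs where some visited node id lacks a graph entry or a listed
-- son id falls outside [0, n): there A raises KeyError/IndexError or relies on
-- accidental negative-index wraparound of `counters_on_ids[son]`.
def Pre_first_dfs (n : Int) (graph : List (Int × List Int)) : Prop :=
  n ≤ (graph.length : Int) ∧  -- implied by the ∀ below (each of the n ids needs an entry); stated first so the check is fast
  ∀ i ∈ List.range n.toNat,
    (pvLook graph (i : Int)).isSome = true ∧
    ∀ s ∈ (pvLook graph (i : Int)).getD [], 0 ≤ s ∧ s < n

instance (n : Int) (graph : List (Int × List Int)) : Decidable (Pre_first_dfs n graph) := by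
  unfold Pre_first_dfs; infer_instance

def pvWitness_first_dfs : Int × (List (Int × List Int)) :=
  (3, [(0, [1, 2]), (1, []), (2, [0, 1])])

def Spec_first_dfs (n : Int) (graph : List (Int × List Int)) (out : List (Int × Int)) : Prop :=
  out = first_dfs_alt n graph
instance (n : Int) (graph : List (Int × List Int)) (out : List (Int × Int)) : Decidable (Spec_first_dfs n graph out) := by unfold Spec_first_dfs; infer_instance

-- ===== CLAIM (what is proved, stated in full; the proofs are below) =====
def Claim_equal_first_dfs : Prop := ∀ (n : Int) (graph : List (Int × List Int)), Dom_first_dfs n graph → Pre_first_dfs n graph → Spec_first_dfs n graph (first_dfs n graph)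

-- ===== LEMMAS AND PROOFS =====

-- number of unvisited (= 0) cells
def pvZeros (cv : List Int) : Nat := cv.countP (fun x => x == 0)

-- semantic form of Pre_: every node in [0, n) has an entry, all of whose sons are in [0, n)
def pvGood (n : Int) (graph : List (Int × List Int)) : Prop :=
  ∀ v : Int, 0 ≤ v → v < n →
    ∃ sons, pvLook graph v = some sons ∧ ∀ s ∈ sons, 0 ≤ s ∧ s < n

-- fuel currency: one unit per adjacency-list slot, plus one per node
def pvSz (graph : List (Int × List Int)) : Nat :=
  (graph.map (fun p => p.2.length + 1)).sum

theorem pvGood_of_pre (n : Int) (graph : List (Int × List Int))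
    (h : Pre_first_dfs n graph) : pvGood n graph := by
  intro v hv0 hvn
  have hlt : v.toNat < n.toNat := by omega
  have := h.2 v.toNat (List.mem_range.mpr hlt)
  rcases this with ⟨hsome, hall⟩
  rcases Option.isSome_iff_exists.mp hsome with ⟨sons, hs⟩
  rw [Int.toNat_of_nonneg hv0] at hs hall
  refine ⟨sons, hs, ?_⟩
  simpa [hs] using hall

theorem pvLook_le_sz (graph : List (Int × List Int)) (v : Int) (sons : List Int)
    (h : pvLook graph v = some sons) : sons.length + 1 ≤ pvSz graph := by
  induction graph with
  | nil => simp [pvLook, PySem.Dict.get?] at h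
  | cons p rest ih =>
    rw [pvLook, PySem.Dict.get?_mk_cons] at h
    by_cases hk : p.1 == v
    · simp [hk] at h
      subst h
      simp [pvSz]
    · simp [hk] at h
      have := ih h
      simp [pvSz] at this ⊢
      omega

theorem pvZeros_le (cv : List Int) : pvZeros cv ≤ cv.length := List.countP_le_length

theorem pvZeros_set_le (cv : List Int) (i : Nat) (v : Int) (hv : v ≠ 0) :
    pvZeros (cv.set i v) ≤ pvZeros cv := by
  by_cases hi : i < cv.length
  · unfold pvZeros
    rw [List.countP_set hi]
    simp [hv]
  · rw [List.set_eq_of_length_le (by omega)]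

theorem pvZeros_set_lt (cv : List Int) (i : Nat) (v : Int) (hv : v ≠ 0)
    (h0 : cv[i]? = some 0) : pvZeros (cv.set i v) < pvZeros cv := by
  have hi : i < cv.length := by
    by_contra hc
    rw [List.getElem?_eq_none (by omega)] at h0
    simp at h0
  have hv0 : cv[i] = 0 := by
    have := List.getElem?_eq_getElem hi
    rw [this] at h0
    exact Option.some.inj h0
  have h1 : pvZeros cv ≠ 0 := by
    unfold pvZeros
    intro hz
    have := List.countP_eq_zero.mp hz _ (List.getElem_mem hi)
    simp [hv0] at this
  have e1 : ((cv[i] == (0 : Int)) = true) := by simp [hv0]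
  have e2 : ((v == (0 : Int)) = false) := by simp [hv]
  unfold pvZeros at h1 ⊢
  rw [List.countP_set hi, e1, e2]
  norm_num
  exact hv0 ▸ List.getElem_mem hi

theorem pvSet_int (cv : List Int) (node : Int) (v : Int) (h0 : 0 ≤ node)
    (h1 : node.toNat < cv.length) :
    PySem.List.pySet? cv node v = some (cv.set node.toNat v) := by
  have := PySem.List.pySet?_natCast cv node.toNat v h1
  rwa [Int.toNat_of_nonneg h0] at this

theorem pvGet_int (cv : List Int) (node : Int) (h0 : 0 ≤ node)
    (h1 : node.toNat < cv.length) :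
    PySem.List.pyGet? cv node = some (cv.getD node.toNat 0) := by
  rw [PySem.List.pyGet?_of_nonneg _ h0, List.getElem?_eq_getElem h1,
    List.getD_eq_getElem cv 0 h1]

theorem pvDrop_cons (xs : List Int) (m : Nat) (y : Int) (ys : List Int)
    (h : xs.drop m = y :: ys) : xs[m]? = some y ∧ xs.drop (m + 1) = ys := by
  induction xs generalizing m with
  | nil => simp at h
  | cons x xs ih =>
    cases m with
    | zero =>
      simp at h
      simp [h]
    | succ m =>
      simp only [List.drop_succ_cons] at h
      have := ih m h
      simpa using this

theorem inFirstDfs_mono (graph : List (Int × List Int)) :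
    ∀ (f f' : Nat), f ≤ f' → ∀ st cv k r,
      inFirstDfs graph f st cv k = some r → inFirstDfs graph f' st cv k = some r := by
  intro f
  induction f with
  | zero => intro f' h st cv k r hr; simp [inFirstDfs] at hr
  | succ f ih =>
    intro f' h st cv k r hr
    obtain ⟨f'', rfl⟩ : ∃ f'', f' = f'' + 1 := ⟨f' - 1, by omega⟩
    have hf : f ≤ f'' := by omega
    match st with
    | [] => simpa [inFirstDfs] using hr
    | (node, kk) :: rest =>
      cases hset : PySem.List.pySet? cv node (k + 1) with
      | none => simp [inFirstDfs, hset] at hr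
      | some cv' =>
        cases hlook : pvLook graph node with
        | none => simp [inFirstDfs, hset, hlook] at hr
        | some sons =>
          by_cases hge : (sons.length : Int) ≤ kk
          · simp only [inFirstDfs, hset, hlook, if_pos hge] at hr ⊢
            exact ih f'' hf _ _ _ _ hr
          · cases hg1 : PySem.List.pyGet? sons kk with
            | none => simp [inFirstDfs, hset, hlook, if_neg hge, hg1] at hr
            | some son =>
              cases hg2 : PySem.List.pyGet? cv' son with
              | none => simp [inFirstDfs, hset, hlook, if_neg hge, hg1, hg2] at hr
              | some v =>
                by_cases hv : v = 0
                · simp only [inFirstDfs, hset, hlook, if_neg hge, hg1, hg2, if_pos hv] at hr ⊢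
                  exact ih f'' hf _ _ _ _ hr
                · simp only [inFirstDfs, hset, hlook, if_neg hge, hg1, hg2, if_neg hv] at hr ⊢
                  exact ih f'' hf _ _ _ _ hr

-- simulation invariants: A's stack machine re-traces B's recursion, with a fuel bound
def SIMPROC (n : Int) (graph : List (Int × List Int)) (f : Nat) : Prop :=
  ∀ cv counter node cv' ctr', pvGood n graph → cv.length = n.toNat →
    0 ≤ node → node < n → PySem.List.pyGet? cv node = some 0 → 0 ≤ counter →
    altProcess graph f cv counter node = some (cv', ctr') →
    cv'.length = cv.length ∧ pvZeros cv' < pvZeros cv ∧ counter < ctr' ∧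
    ∃ d, d ≤ (pvZeros cv - pvZeros cv') * (pvSz graph + 1) ∧
      ∀ fA rest out, inFirstDfs graph fA rest cv' ctr' = some out →
        inFirstDfs graph (fA + d) ((node, 0) :: rest) cv counter = some out

def SIMSONS (n : Int) (graph : List (Int × List Int)) (f : Nat) : Prop :=
  ∀ l cv counter node sons (k : Int) cB ctrB, pvGood n graph → cv.length = n.toNat →
    0 ≤ node → node < n → pvLook graph node = some sons →
    (∀ s ∈ sons, 0 ≤ s ∧ s < n) → 0 ≤ k → l = sons.drop k.toNat → 0 < counter →
    altSonsGo (altProcess graph f) node cv counter l = some (cB, ctrB) →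
    cB.length = cv.length ∧ pvZeros cB ≤ pvZeros cv ∧ counter ≤ ctrB ∧
    ∃ d, d ≤ (l.length + 1) + (pvZeros cv - pvZeros cB) * (pvSz graph + 1) ∧
      ∀ fA rest out cPre, inFirstDfs graph fA rest cB ctrB = some out →
        PySem.List.pySet? cPre node counter = some cv →
        inFirstDfs graph (fA + d) ((node, k) :: rest) cPre (counter - 1) = some out

theorem simproc_zero (n : Int) (graph : List (Int × List Int)) : SIMPROC n graph 0 := by
  intro cv counter node cv' ctr' _ _ _ _ _ _ h
  simp [altProcess] at h

theorem simproc_succ (n : Int) (graph : List (Int × List Int)) (f : Nat)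
    (hS : SIMSONS n graph f) : SIMPROC n graph (f + 1) := by
  intro cv counter node cv' ctr' hG hlen h0 hn hget hc hsucc
  have hnn : node.toNat < cv.length := by omega
  have hset : PySem.List.pySet? cv node (counter + 1) = some (cv.set node.toNat (counter + 1)) :=
    pvSet_int cv node (counter + 1) h0 hnn
  rcases hG node h0 hn with ⟨sons, hlook, hsons⟩
  rw [altProcess, hset, hlook] at hsucc
  have hidx : cv[node.toNat]? = some 0 := by
    rw [PySem.List.pyGet?_of_nonneg _ h0] at hget
    exact hget
  have hz1 : pvZeros (cv.set node.toNat (counter + 1)) < pvZeros cv :=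
    pvZeros_set_lt cv node.toNat (counter + 1) (by omega) hidx
  have := hS sons (cv.set node.toNat (counter + 1)) (counter + 1) node sons 0 cv' ctr'
    hG (by simpa using hlen) h0 hn hlook hsons (by omega) (by simp) (by omega) hsucc
  rcases this with ⟨hlenB, hzB, hctrB, d, hd, htrans⟩
  refine ⟨by simpa using hlenB, by omega, by omega, d, ?_, ?_⟩
  · have hsz : sons.length + 1 ≤ pvSz graph := pvLook_le_sz graph node sons hlook
    have h1 : (pvZeros (cv.set node.toNat (counter + 1)) - pvZeros cv' + 1) ≤ pvZeros cv - pvZeros cv' := by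
      omega
    calc d ≤ (sons.length + 1) + (pvZeros (cv.set node.toNat (counter + 1)) - pvZeros cv') * (pvSz graph + 1) := hd
      _ ≤ (pvSz graph + 1) + (pvZeros (cv.set node.toNat (counter + 1)) - pvZeros cv') * (pvSz graph + 1) := by omega
      _ = (pvZeros (cv.set node.toNat (counter + 1)) - pvZeros cv' + 1) * (pvSz graph + 1) := by ring
      _ ≤ (pvZeros cv - pvZeros cv') * (pvSz graph + 1) := Nat.mul_le_mul_right _ h1
  · intro fA rest out hrest
    have := htrans fA rest out cv hrest hset
    have he : counter + 1 - 1 = counter := by omega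
    rwa [he] at this

theorem simsons_of (n : Int) (graph : List (Int × List Int)) (f : Nat)
    (hP : SIMPROC n graph f) : SIMSONS n graph f := by
  intro l
  induction l with
  | nil =>
    intro cv counter node sons k cB ctrB hG hlen h0 hn hlook hsons hk0 hdrop hc hsucc
    rw [altSonsGo] at hsucc
    obtain ⟨rfl, rfl⟩ : cv = cB ∧ counter = ctrB := by
      constructor <;> [skip; skip] <;> injection hsucc with h <;> cases h <;> rfl
    refine ⟨rfl, le_refl _, le_refl _, 1, by omega, ?_⟩
    intro fA rest out cPre hrest hsetPre
    have hke : (sons.length : Int) ≤ k := by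
      have := List.drop_eq_nil_iff.mp hdrop.symm
      omega
    rw [inFirstDfs]
    have he : counter - 1 + 1 = counter := by omega
    rw [he]
    simp only [hsetPre, hlook]
    rw [if_pos hke]
    exact hrest
  | cons son l' ih =>
    intro cv counter node sons k cB ctrB hG hlen h0 hn hlook hsons hk0 hdrop hc hsucc
    have hdc := pvDrop_cons sons k.toNat son l' hdrop.symm
    rcases hdc with ⟨hsk, hdrop'⟩
    have hsonmem : son ∈ sons := List.mem_of_getElem? hsk
    rcases hsons son hsonmem with ⟨hs0, hsn⟩
    have hklt : k.toNat < sons.length := by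
      by_contra hcon
      rw [List.getElem?_eq_none (by omega)] at hsk
      simp at hsk
    rw [altSonsGo] at hsucc
    cases hgson : PySem.List.pyGet? cv son with
    | none => rw [hgson] at hsucc; simp at hsucc
    | some v =>
      simp only [hgson] at hsucc
      by_cases hv : v = 0
      · -- unvisited son: recurse
        subst hv
        rw [if_pos rfl] at hsucc
        cases hrec : altProcess graph f cv counter son with
        | none => rw [hrec] at hsucc; simp at hsucc
        | some p =>
          obtain ⟨c1, k1⟩ := p
          simp only [hrec] at hsucc
          have hprops := hP cv counter son c1 k1 hG hlen hs0 hsn hgson (by omega) hrec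
          rcases hprops with ⟨hlen1, hz1, hk1, dson, hdson, htransP⟩
          have hnn1 : node.toNat < c1.length := by omega
          have hset2 : PySem.List.pySet? c1 node (k1 + 1) = some (c1.set node.toNat (k1 + 1)) :=
            pvSet_int c1 node (k1 + 1) h0 hnn1
          simp only [hset2] at hsucc
          have hz2 : pvZeros (c1.set node.toNat (k1 + 1)) ≤ pvZeros c1 :=
            pvZeros_set_le c1 node.toNat (k1 + 1) (by omega)
          have hih := ih (c1.set node.toNat (k1 + 1)) (k1 + 1) node sons (k + 1) cB ctrB
            hG (by simpa using hlen1.trans hlen) h0 hn hlook hsons (by omega)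
            (by rw [← hdrop']; congr 1; omega) (by omega) hsucc
          rcases hih with ⟨hlenB, hzB, hctrB, drest, hdrest, htransR⟩
          refine ⟨by simp at hlenB; omega, by simp at hlenB hzB ⊢; omega, by omega,
            dson + drest + 1, ?_, ?_⟩
          · have hfac : (pvZeros cv - pvZeros c1) + (pvZeros (c1.set node.toNat (k1 + 1)) - pvZeros cB)
                ≤ pvZeros cv - pvZeros cB := by omega
            calc dson + drest + 1
                ≤ (pvZeros cv - pvZeros c1) * (pvSz graph + 1)
                  + ((l'.length + 1) + (pvZeros (c1.set node.toNat (k1 + 1)) - pvZeros cB) * (pvSz graph + 1)) + 1 := by omega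
              _ = ((l'.length + 1) + 1)
                  + ((pvZeros cv - pvZeros c1) + (pvZeros (c1.set node.toNat (k1 + 1)) - pvZeros cB)) * (pvSz graph + 1) := by ring
              _ ≤ ((son :: l').length + 1) + (pvZeros cv - pvZeros cB) * (pvSz graph + 1) := by
                  have := Nat.mul_le_mul_right (pvSz graph + 1) hfac
                  simp only [List.length_cons]
                  omega
          · intro fA rest out cPre hrest hsetPre
            have hstep2 := htransR fA rest out c1 hrest hset2
            have he1 : k1 + 1 - 1 = k1 := by omega
            rw [he1] at hstep2
            have hstep3 := htransP (fA + drest) ((node, k + 1) :: rest) out hstep2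
            have hgoalfuel : fA + (dson + drest + 1) = (fA + drest + dson) + 1 := by omega
            rw [hgoalfuel, inFirstDfs]
            have he : counter - 1 + 1 = counter := by omega
            rw [he]
            have hgk : PySem.List.pyGet? sons k = some son := by
              rw [PySem.List.pyGet?_of_nonneg _ hk0]
              exact hsk
            simp only [hsetPre, hlook, hgk, hgson]
            rw [if_neg (by omega)]
            simp only [if_true]
            exact hstep3
      · -- already-visited son: only the re-label
        rw [if_neg hv] at hsucc
        simp only [] at hsucc
        cases hset2 : PySem.List.pySet? cv node (counter + 1) with
        | none =>
          have hnn : node.toNat < cv.length := by omega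
          rw [pvSet_int cv node (counter + 1) h0 hnn] at hset2
          simp at hset2
        | some c2 =>
          simp only [hset2] at hsucc
          have hnn : node.toNat < cv.length := by omega
          have hset2' := pvSet_int cv node (counter + 1) h0 hnn
          rw [hset2'] at hset2
          obtain rfl : c2 = cv.set node.toNat (counter + 1) := by injection hset2 with h; exact h.symm
          have hz2 : pvZeros (cv.set node.toNat (counter + 1)) ≤ pvZeros cv :=
            pvZeros_set_le cv node.toNat (counter + 1) (by omega)
          have hih := ih (cv.set node.toNat (counter + 1)) (counter + 1) node sons (k + 1) cB ctrB
            hG (by simpa using hlen) h0 hn hlook hsons (by omega)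
            (by rw [← hdrop']; congr 1; omega) (by omega) hsucc
          rcases hih with ⟨hlenB, hzB, hctrB, drest, hdrest, htransR⟩
          refine ⟨by simpa using hlenB, by simp at hlenB hzB ⊢; omega, by omega, drest + 1, ?_, ?_⟩
          · have hfac : pvZeros (cv.set node.toNat (counter + 1)) - pvZeros cB ≤ pvZeros cv - pvZeros cB := by omega
            have := Nat.mul_le_mul_right (pvSz graph + 1) hfac
            simp only [List.length_cons]
            omega
          · intro fA rest out cPre hrest hsetPre
            have hstep2 := htransR fA rest out cv hrest hset2'
            have he1 : counter + 1 - 1 = counter := by omega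
            rw [he1] at hstep2
            have hgoalfuel : fA + (drest + 1) = (fA + drest) + 1 := by omega
            rw [hgoalfuel, inFirstDfs]
            have he : counter - 1 + 1 = counter := by omega
            rw [he]
            have hgk : PySem.List.pyGet? sons k = some son := by
              rw [PySem.List.pyGet?_of_nonneg _ hk0]
              exact hsk
            simp only [hsetPre, hlook, hgk, hgson]
            rw [if_neg (by omega), if_neg hv]
            exact hstep2

theorem simproc_all (n : Int) (graph : List (Int × List Int)) :
    ∀ f, SIMPROC n graph f := by
  intro f
  induction f with
  | zero => exact simproc_zero n graph
  | succ f ih => exact simproc_succ n graph f (simsons_of n graph f ih)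

-- totality of B's recursion under Pre_ (fuel n+1 suffices: each call consumes a zero)
def TOTPROC (n : Int) (graph : List (Int × List Int)) (f : Nat) : Prop :=
  ∀ cv counter node, pvGood n graph → cv.length = n.toNat →
    0 ≤ node → node < n → PySem.List.pyGet? cv node = some 0 → 0 ≤ counter →
    pvZeros cv < f → ∃ r, altProcess graph f cv counter node = some r

theorem totsons_of (n : Int) (graph : List (Int × List Int)) (f : Nat)
    (hT : TOTPROC n graph f) :
    ∀ l cv counter node, pvGood n graph → cv.length = n.toNat →
      0 ≤ node → node < n → (∀ s ∈ l, 0 ≤ s ∧ s < n) → 0 < counter →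
      pvZeros cv < f →
      ∃ r, altSonsGo (altProcess graph f) node cv counter l = some r := by
  intro l
  induction l with
  | nil => intro cv counter node _ _ _ _ _ _ _; exact ⟨(cv, counter), rfl⟩
  | cons son l' ih =>
    intro cv counter node hG hlen h0 hn hsons hc hz
    rcases hsons son (by simp) with ⟨hs0, hsn⟩
    have hsnn : son.toNat < cv.length := by omega
    have hgson := pvGet_int cv son hs0 hsnn
    by_cases hv : cv.getD son.toNat 0 = 0
    · rw [hv] at hgson
      rcases hT cv counter son hG hlen hs0 hsn hgson (by omega) hz with ⟨⟨c1, k1⟩, hrec⟩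
      have hprops := simproc_all n graph f cv counter son c1 k1 hG hlen hs0 hsn hgson (by omega) hrec
      rcases hprops with ⟨hlen1, hz1, hk1, _, _, _⟩
      have hnn1 : node.toNat < c1.length := by omega
      have hset2 := pvSet_int c1 node (k1 + 1) h0 hnn1
      have hih := ih (c1.set node.toNat (k1 + 1)) (k1 + 1) node hG
        (by simpa using hlen1.trans hlen) h0 hn (fun s hs => hsons s (by simp [hs])) (by omega)
        (by
          have := pvZeros_set_le c1 node.toNat (k1 + 1) (by omega)
          omega)
      rcases hih with ⟨r, hr⟩
      refine ⟨r, ?_⟩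
      rw [altSonsGo]
      simp only [hgson, reduceIte, hrec, hset2]
      exact hr
    · have hnn : node.toNat < cv.length := by omega
      have hset2 := pvSet_int cv node (counter + 1) h0 hnn
      have hih := ih (cv.set node.toNat (counter + 1)) (counter + 1) node hG
        (by simpa using hlen) h0 hn (fun s hs => hsons s (by simp [hs])) (by omega)
        (by
          have := pvZeros_set_le cv node.toNat (counter + 1) (by omega)
          omega)
      rcases hih with ⟨r, hr⟩
      refine ⟨r, ?_⟩
      rw [altSonsGo]
      simp only [hgson, if_neg hv, hset2]
      exact hr

theorem totproc_all (n : Int) (graph : List (Int × List Int)) :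
    ∀ f, TOTPROC n graph f := by
  intro f
  induction f with
  | zero => intro cv counter node _ _ _ _ _ _ hz; omega
  | succ f ih =>
    intro cv counter node hG hlen h0 hn hget hc hz
    have hnn : node.toNat < cv.length := by omega
    have hset := pvSet_int cv node (counter + 1) h0 hnn
    rcases hG node h0 hn with ⟨sons, hlook, hsons⟩
    have hidx : cv[node.toNat]? = some 0 := by
      rw [PySem.List.pyGet?_of_nonneg _ h0] at hget
      exact hget
    have hz1 : pvZeros (cv.set node.toNat (counter + 1)) < pvZeros cv :=
      pvZeros_set_lt cv node.toNat (counter + 1) (by omega) hidx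
    have hih := totsons_of n graph f ih sons (cv.set node.toNat (counter + 1)) (counter + 1) node
      hG (by simpa using hlen) h0 hn hsons (by omega) (by omega)
    rcases hih with ⟨r, hr⟩
    refine ⟨r, ?_⟩
    rw [altProcess]
    simp only [hset, hlook]
    exact hr

theorem pvDriver (n : Int) (graph : List (Int × List Int)) (hG : pvGood n graph) :
    ∀ (l : List Int) (cv : List Int) (counter : Int), cv.length = n.toNat → 0 ≤ counter →
      (∀ i ∈ l, 0 ≤ i ∧ i < n) →
      l.foldl (fun (st : List Int × Int) i =>
        if PySem.List.pyGetD st.1 i 0 = 0 then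
          match inFirstDfs graph (n.toNat * ((graph.map (fun p => p.2.length + 1)).sum + 1) + 1) [(i, 0)] st.1 st.2 with
          | none => st
          | some (cv', ctr') => (cv', ctr' + 1)
        else st) (cv, counter)
      = l.foldl (fun (st : List Int × Int) i =>
        if PySem.List.pyGetD st.1 i 0 = 0 then
          match altProcess graph (n.toNat + 1) st.1 st.2 i with
          | none => st
          | some (cv', ctr') => (cv', ctr' + 1)
        else st) (cv, counter) := by
  intro l
  induction l with
  | nil => intro cv counter _ _ _; rfl
  | cons i l' ih =>
    intro cv counter hlen hc hl
    rcases hl i (by simp) with ⟨hi0, hin⟩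
    have hinn : i.toNat < cv.length := by omega
    simp only [List.foldl_cons]
    by_cases hcond : PySem.List.pyGetD cv i 0 = 0
    · have hval : cv.getD i.toNat 0 = 0 := by
        rw [PySem.List.pyGetD_eq_getElem cv 0 hi0 (by omega)] at hcond
        rw [List.getD_eq_getElem cv 0 hinn]
        exact hcond
      have hget : PySem.List.pyGet? cv i = some 0 := by
        rw [pvGet_int cv i hi0 hinn, hval]
      have hz : pvZeros cv < n.toNat + 1 := by
        have := pvZeros_le cv
        omega
      rcases totproc_all n graph (n.toNat + 1) cv counter i hG hlen hi0 hin hget hc hz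
        with ⟨⟨cv', ctr'⟩, hproc⟩
      rcases simproc_all n graph (n.toNat + 1) cv counter i cv' ctr' hG hlen hi0 hin hget hc hproc
        with ⟨hlen', hz', hctr', d, hd, htrans⟩
      have hbase : inFirstDfs graph 1 [] cv' ctr' = some (cv', ctr') := rfl
      have hA1 := htrans 1 [] (cv', ctr') hbase
      have hdn : 1 + d ≤ n.toNat * ((graph.map (fun p => p.2.length + 1)).sum + 1) + 1 := by
        have h1 : pvZeros cv - pvZeros cv' ≤ n.toNat := by
          have := pvZeros_le cv
          omega
        have h2 := Nat.mul_le_mul_right (pvSz graph + 1) h1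
        have h3 : (graph.map (fun p => p.2.length + 1)).sum = pvSz graph := rfl
        rw [h3]
        omega
      have hAF := inFirstDfs_mono graph (1 + d) _ hdn _ _ _ _ hA1
      simp only [if_pos hcond, hAF, hproc]
      exact ih cv' (ctr' + 1) (hlen'.trans hlen) (by omega)
        (fun j hj => hl j (by simp [hj]))
    · simp only [if_neg hcond]
      exact ih cv counter hlen hc (fun j hj => hl j (by simp [hj]))

-- ===== VERDICT (by name: the statement is the Claim_ definition above) =====
theorem first_dfs_spec : Claim_equal_first_dfs := by
  intro n graph hdom hpre
  unfold Spec_first_dfs first_dfs first_dfs_alt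
  have hG := pvGood_of_pre n graph hpre
  have hst := pvDriver n graph hG (PySem.List.pyRange 0 n 1) (List.replicate n.toNat 0) 0
    (by simp) (by omega)
    (fun i hi => by
      rw [PySem.List.mem_pyRange_one] at hi
      exact ⟨hi.1, hi.2⟩)
  simp only []
  rw [hst]
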